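-- pv_equiv track=rewrite | github.com/zcappai/MSc-Computer-Science | Chequerboard 2D Array/main.py | cheqLine
-- ===== SOURCE A (Python) =====
-- def cheqLine(length, hashLength):
--     line = []
--     count = 0
--     hashCount = 0
--     spaceCount = 0
--     while(count <  length):
--         if(hashCount < hashLength):
--             line += '#'
--             hashCount += 1
--         elif(spaceCount <  hashLength):
--             line += ' '
--             spaceCount += 1
--         if(spaceCount == hashLength):
--             hashCount = 0
--             spaceCount = 0
--         count += 1
--     return line
-- ===== SOURCE B (Python) =====
-- def cheqLine(length, hashLength):
--     if hashLength <= 0 or length <= 0: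
--         return []
--     m = min(hashLength, length)
--     block = ['#'] * m + [' '] * m
--     return (block * (length // (2 * m) + 1))[:length]
-- ===== Notes on version B (the rewrite author's own statement) =====
-- stated objective: simpler
-- what changed: Replaces the per-character counter state machine (hashCount/spaceCount with resets) by building the '#'*m+' '*m period once (m = min(hashLength, length)), tiling it with list repetition, and slicing to the requested length.
import Mathlib
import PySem

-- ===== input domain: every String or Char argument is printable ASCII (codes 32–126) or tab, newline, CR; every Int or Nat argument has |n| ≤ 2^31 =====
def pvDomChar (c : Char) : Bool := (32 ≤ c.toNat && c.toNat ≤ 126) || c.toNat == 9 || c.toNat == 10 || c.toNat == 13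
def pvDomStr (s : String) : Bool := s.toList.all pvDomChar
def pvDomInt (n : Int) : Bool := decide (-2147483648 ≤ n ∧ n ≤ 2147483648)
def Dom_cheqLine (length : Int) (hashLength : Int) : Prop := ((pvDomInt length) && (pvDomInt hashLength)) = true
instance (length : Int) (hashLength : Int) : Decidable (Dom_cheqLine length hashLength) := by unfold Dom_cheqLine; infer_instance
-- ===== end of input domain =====

-- B builds the '#'*h+' '*h period once, tiles it and slices to length; A's per-character counter state machine is replaced (objective: simpler).

-- ===== PORT A =====
-- while(count < length) loop: count goes 0,1,…, so it runs length.toNat iterations; state = (line, hashCount, spaceCount).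
def cheqLoop : Nat → List String → Int → Int → Int → List String
  | 0, line, _, _, _ => line
  | n+1, line, h, s, hl =>
    if h < hl then
      (if s = hl then cheqLoop n (line ++ ["#"]) 0 0 hl
       else cheqLoop n (line ++ ["#"]) (h+1) s hl)
    else if s < hl then
      (if s + 1 = hl then cheqLoop n (line ++ [" "]) 0 0 hl
       else cheqLoop n (line ++ [" "]) h (s+1) hl)
    else
      (if s = hl then cheqLoop n line 0 0 hl else cheqLoop n line h s hl)

def cheqLine (length : Int) (hashLength : Int) : List String :=
  cheqLoop length.toNat [] 0 0 hashLength

-- ===== PORT B =====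
-- m = min(hashLength, length); block * k -> flatten (replicate k block); [:length] with length > 0 in this branch -> take length.toNat (exact there)
def cheqLine_alt (length : Int) (hashLength : Int) : List String :=
  if hashLength ≤ 0 ∨ length ≤ 0 then []
  else
    List.take length.toNat
      (List.flatten (List.replicate
        (PySem.Int.floordiv length (2 * min hashLength length) + 1).toNat
        (List.replicate (min hashLength length).toNat "#" ++
         List.replicate (min hashLength length).toNat " ")))

-- ===== PRECONDITION & SPEC =====
def Spec_cheqLine (length : Int) (hashLength : Int) (out : List String) : Prop := out = cheqLine_alt length hashLength
instance (length : Int) (hashLength : Int) (out : List String) : Decidable (Spec_cheqLine length hashLength out) := by unfold Spec_cheqLine; infer_instance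

-- ===== CLAIM (what is proved, stated in full; the proofs are below) =====
def Claim_equal_cheqLine : Prop := ∀ (length : Int) (hashLength : Int), Dom_cheqLine length hashLength → Spec_cheqLine length hashLength (cheqLine length hashLength)

-- ===== LEMMAS AND PROOFS =====

-- the periodic character at position i (period 2*hl', first half '#')
def chq (hl' : Nat) (i : Nat) : String := if i % (2 * hl') < hl' then "#" else " "

-- degenerate hashLength: the loop never appends and never changes state
theorem cheqLoop_nonpos (n : Nat) (line : List String) (hl : Int) (hhl : hl <= 0) :
    cheqLoop n line 0 0 hl = line := by
  induction n with
  | zero => rfl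
  | succ n ih =>
      simp only [cheqLoop]
      rw [if_neg (by omega), if_neg (by omega)]
      split <;> exact ih

-- accumulator lemma
theorem cheqLoop_acc (n : Nat) (line : List String) (h s hl : Int) :
    cheqLoop n line h s hl = line ++ cheqLoop n [] h s hl := by
  induction n generalizing line h s with
  | zero => simp [cheqLoop]
  | succ n ih =>
      simp only [cheqLoop, List.nil_append]
      split
      · split <;> (rw [ih, ih ["#"]]; simp)
      · split
        · split <;> (rw [ih, ih [" "]]; simp)
        · split <;> exact ih line _ _

-- state encoding from the position p within the period
def stH (hl' p : Nat) : Int := if p < hl' then (p : Int) else (hl' : Int)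
def stS (hl' p : Nat) : Int := if p < hl' then 0 else (p : Int) - (hl' : Int)

-- the loop from state p emits the periodic characters at p, p+1, …
theorem cheqLoop_chq (hl' : Nat) (hpos : 0 < hl') (n p : Nat) (hp : p < 2 * hl') :
    cheqLoop n [] (stH hl' p) (stS hl' p) (hl' : Int) =
      (List.range n).map (fun i => chq hl' (p + i)) := by
  induction n generalizing p with
  | zero => simp [cheqLoop]
  | succ n ih =>
      rw [List.range_succ_eq_map, List.map_cons, List.map_map]
      simp only [cheqLoop, stH, stS, List.nil_append]
      by_cases hp1 : p < hl'
      · rw [if_pos hp1, if_pos hp1, if_pos (by exact_mod_cast hp1), if_neg (by omega),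
            cheqLoop_acc n ["#"], List.singleton_append]
        have hhead : chq hl' (p + 0) = "#" := by
          simp [chq, Nat.mod_eq_of_lt (by omega : p < 2 * hl'), hp1]
        rw [hhead]
        congr 1
        by_cases hp2 : p + 1 < hl'
        · have := ih (p + 1) (by omega)
          simp only [stH, stS, if_pos hp2] at this
          rw [show ((p : Int) + 1) = ((p + 1 : Nat) : Int) by push_cast; ring, this]
          apply List.map_congr_left; intro i _
          simp only [Function.comp]; congr 1; omega
        · have hpe : p + 1 = hl' := by omega
          have := ih (p + 1) (by omega)
          simp only [stH, stS, if_neg hp2] at this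
          rw [show ((p + 1 : Nat) : Int) - (hl' : Int) = 0 by rw [hpe]; ring] at this
          rw [show ((p : Int) + 1) = ((hl' : Nat) : Int) by omega, this]
          apply List.map_congr_left; intro i _
          simp only [Function.comp]; congr 1; omega
      · -- space phase: h = hl', s = p - hl' < hl'
        rw [if_neg hp1, if_neg hp1, if_neg (by simp), if_pos (by omega)]
        have hhead : chq hl' (p + 0) = " " := by
          simp [chq, Nat.mod_eq_of_lt (by omega : p < 2 * hl'), hp1]
        by_cases hp2 : p + 1 < 2 * hl'
        · rw [if_neg (by omega), cheqLoop_acc n [" "], List.singleton_append, hhead]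
          congr 1
          have := ih (p + 1) hp2
          simp only [stH, stS, if_neg (by omega : ¬ p + 1 < hl')] at this
          rw [show (p : Int) - (hl' : Int) + 1 = ((p + 1 : Nat) : Int) - (hl' : Int) by
                push_cast; ring, this]
          apply List.map_congr_left; intro i _
          simp only [Function.comp]; congr 1; omega
        · have hpe : p + 1 = 2 * hl' := by omega
          rw [if_pos (by omega), cheqLoop_acc n [" "], List.singleton_append, hhead]
          congr 1
          have := ih 0 (by omega)
          simp only [stH, stS, if_pos hpos, Nat.cast_zero] at this
          rw [this]
          apply List.map_congr_left; intro i _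
          simp only [Function.comp, Nat.zero_add, chq]
          congr 1
          rw [show p + Nat.succ i = i + 2 * hl' by omega, Nat.add_mod_right]

-- one period of the board equals the periodic characters 0..2hl'-1
theorem block_chq (hl' : Nat) :
    (List.replicate hl' "#" ++ List.replicate hl' " ") =
      (List.range (2 * hl')).map (chq hl') := by
  apply List.ext_getElem
  · simp; omega
  · intro i hi1 hi2
    have hiP : i < 2 * hl' := by simp at hi1; omega
    rw [List.getElem_map, List.getElem_range]
    simp only [chq, Nat.mod_eq_of_lt hiP]
    by_cases hih : i < hl'
    · rw [List.getElem_append_left (by simpa), List.getElem_replicate, if_pos hih]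
    · rw [List.getElem_append_right (by simpa using hih), List.getElem_replicate, if_neg hih]

-- the tiled-and-truncated block is the same periodic prefix
theorem take_flatten_chq (hl' : Nat) (m n : Nat) (hn : n <= m * (2 * hl')) :
    List.take n (List.flatten (List.replicate m
        (List.replicate hl' "#" ++ List.replicate hl' " "))) =
      (List.range n).map (chq hl') := by
  induction m generalizing n with
  | zero =>
      have : n = 0 := by omega
      simp [this]
  | succ m ih =>
      have hexp : (m + 1) * (2 * hl') = m * (2 * hl') + 2 * hl' := by ring
      have hbl : (List.replicate hl' "#" ++ List.replicate hl' (" " : String)).length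
          = 2 * hl' := by simp; omega
      rw [List.replicate_succ, List.flatten_cons, List.take_append, hbl]
      by_cases hnP : n <= 2 * hl'
      · rw [show n - 2 * hl' = 0 by omega]
        simp only [List.take_zero, List.append_nil]
        rw [block_chq hl', ← List.map_take, List.take_range, Nat.min_eq_left hnP]
      · rw [List.take_of_length_le (by rw [hbl]; omega), ih (n - 2 * hl') (by omega),
            block_chq hl']
        have hsplit : n = 2 * hl' + (n - 2 * hl') := by omega
        rw [hsplit, List.range_add, List.map_append, List.map_map]
        congr 1
        · rw [show 2 * hl' + (n - 2 * hl') - 2 * hl' = n - 2 * hl' by omega]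
          apply List.map_congr_left; intro i _
          simp [Function.comp, chq, Nat.add_mod_left]

-- ===== VERDICT (by name: the statement is the Claim_ definition above) =====
theorem cheqLine_spec : Claim_equal_cheqLine := by
  intro length hl _
  unfold Spec_cheqLine cheqLine cheqLine_alt
  by_cases h0 : hl ≤ 0 ∨ length ≤ 0
  · rw [if_pos h0]
    rcases h0 with h0 | h0
    · exact cheqLoop_nonpos _ _ _ h0
    · rw [show length.toNat = 0 by omega]; rfl
  · obtain ⟨hhl, hlen⟩ := not_or.mp h0
    rw [if_neg (by omega)]
    set m := min hl length with hm
    have hm0 : 0 < m := by omega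
    set hl' := hl.toNat with hhl'
    set m' := m.toNat with hm'
    have hcast : (hl' : Int) = hl := Int.toNat_of_nonneg (by omega)
    have hmcast : (m' : Int) = m := Int.toNat_of_nonneg (by omega)
    have hpos : 0 < hl' := by omega
    have hmpos : 0 < m' := by omega
    have h0' := cheqLoop_chq hl' hpos length.toNat 0 (by omega)
    simp only [stH, stS, if_pos hpos, Nat.cast_zero, Nat.zero_add, hcast] at h0'
    rw [h0']
    rw [take_flatten_chq m' _ _ ?_]
    · -- the two periodic prefixes agree below length (if hl ≥ length both are all '#')
      apply List.map_congr_left; intro i hi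
      have hilt : i < length.toNat := List.mem_range.mp hi
      by_cases hcase : hl < length
      · have : m = hl := by omega
        have : m' = hl' := by omega
        rw [this]
      · have hmeq : m' = length.toNat := by omega
        have h1 : i < hl' := by omega
        have h2 : i < m' := by omega
        simp only [chq]
        rw [Nat.mod_eq_of_lt (by omega), Nat.mod_eq_of_lt (by omega),
            if_pos h1, if_pos h2]
    · -- (q+1) * 2m' ≥ length
      set q := PySem.Int.floordiv length (2 * m) with hq
      have h1 := PySem.Int.floordiv_mul_add_mod length (2 * m)
      have h2 : PySem.Int.mod length (2 * m) < 2 * m :=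
        PySem.Int.mod_lt length (by omega)
      have hq0 : 0 ≤ q := by
        rw [hq]
        exact (PySem.Int.le_floordiv_iff_mul_le (by omega)).mpr (by omega)
      rw [Int.toNat_le]
      push_cast [Int.toNat_of_nonneg (by omega : (0:Int) ≤ q + 1), hmcast]
      nlinarith [h1, h2]
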